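-- pv_equiv track=rewrite | github.com/maspadaru/laser-star | scripts/cbparse.py | _parse_conjunction
-- ===== SOURCE A (Python) =====
-- def _parse_conjunction(conjunction):
--     '''
--     parse atoms (starts with alphanumeric, ends with ')')
--     '''
--     result = []
--     atom_chars = []
--     prev_char = ""
--     for char in conjunction:
--         if char == ',' and prev_char == ')':
--             atom = ''.join(atom_chars)
--             atom_chars = []
--             result.append(atom)
--         else:
--             atom_chars.append(char)
--         prev_char = char
--     if atom_chars:
--         atom = ''.join(atom_chars)
--         result.append(atom)
--     return result
-- ===== SOURCE B (Python) =====
-- def _parse_conjunction(conjunction):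
--     parts = conjunction.split('),')
--     atoms = [p + ')' for p in parts[:-1]]
--     if parts[-1]:
--         atoms.append(parts[-1])
--     return atoms
-- ===== Notes on version B (the rewrite author's own statement) =====
-- stated objective: simpler
-- what changed: Replaces the per-character state machine (prev_char tracking and char-by-char atom accumulation) by a single substring split on the two-character separator, re-adding the closing parenthesis to each non-final piece and dropping a trailing empty piece.
import Mathlib
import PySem

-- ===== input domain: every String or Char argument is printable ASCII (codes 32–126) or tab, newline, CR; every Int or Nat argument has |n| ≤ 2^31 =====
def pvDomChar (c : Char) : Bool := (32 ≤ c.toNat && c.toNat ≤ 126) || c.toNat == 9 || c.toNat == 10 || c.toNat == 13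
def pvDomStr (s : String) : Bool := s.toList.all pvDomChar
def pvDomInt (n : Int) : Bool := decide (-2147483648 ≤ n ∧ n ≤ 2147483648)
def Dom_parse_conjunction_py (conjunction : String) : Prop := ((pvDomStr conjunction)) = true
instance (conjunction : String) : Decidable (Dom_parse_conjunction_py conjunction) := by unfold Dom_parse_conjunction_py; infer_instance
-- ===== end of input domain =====

-- B replaces A's per-character state machine by a single substring split on '),'
-- re-adding ')' to the non-final pieces and dropping a trailing empty piece (objective: simpler).


-- ===== PORT A =====
-- loop body: state (result, atom_chars, prev_char); prev_char "" at the start is `none`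
def pcStep (st : List String × List Char × Option Char) (char : Char) :
    List String × List Char × Option Char :=
  if char = ',' ∧ st.2.2 = some ')' then
    (st.1 ++ [String.mk st.2.1], [], some char)
  else
    (st.1, st.2.1 ++ [char], some char)

-- the code after the loop: `if atom_chars: result.append(''.join(atom_chars))`
def pcFinish (st : List String × List Char × Option Char) : List String :=
  if st.2.1 ≠ [] then st.1 ++ [String.mk st.2.1] else st.1

def parse_conjunction_py (conjunction : String) : List String :=
  pcFinish (conjunction.toList.foldl pcStep ([], [], none))

-- ===== PORT B =====
-- parts = conjunction.split('),')  (PySem.Chars.splitOn); parts is never empty, so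
-- parts[:-1] is dropLast and parts[-1] is getLastD [] (exact here).
def parse_conjunction_py_alt (conjunction : String) : List String :=
  let parts := PySem.Chars.splitOn conjunction.toList [')', ',']
  let atoms := parts.dropLast.map (fun p => String.mk (p ++ [')']))
  if parts.getLastD [] ≠ [] then atoms ++ [String.mk (parts.getLastD [])] else atoms

-- ===== PRECONDITION & SPEC =====
def Spec_parse_conjunction_py (conjunction : String) (out : List String) : Prop := out = parse_conjunction_py_alt conjunction
instance (conjunction : String) (out : List String) : Decidable (Spec_parse_conjunction_py conjunction out) := by unfold Spec_parse_conjunction_py; infer_instance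

-- ===== CLAIM (what is proved, stated in full; the proofs are below) =====
def Claim_equal_parse_conjunction_py : Prop := ∀ (conjunction : String), Dom_parse_conjunction_py conjunction → Spec_parse_conjunction_py conjunction (parse_conjunction_py conjunction)

-- ===== LEMMAS AND PROOFS =====

-- structural form of split-on-'),' : segments between non-overlapping occurrences of '),'
def gsplit : List Char → List (List Char)
  | [] => [[]]
  | [c] => [[c]]
  | c :: d :: rest =>
    if c = ')' ∧ d = ',' then [] :: gsplit rest
    else (gsplit (d :: rest)).modifyHead (c :: ·)

lemma gsplit_ne_nil : ∀ l : List Char, gsplit l ≠ []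
  | [] => by simp [gsplit]
  | [c] => by simp [gsplit]
  | c :: d :: rest => by
    simp only [gsplit]
    split_ifs
    · simp
    · rcases h : gsplit (d :: rest) with _ | ⟨a, t⟩
      · exact absurd h (gsplit_ne_nil (d :: rest))
      · simp

lemma isPrefixOf_pair (c : Char) (rest : List Char) :
    List.isPrefixOf [')', ','] (c :: rest) = true ↔ c = ')' ∧ rest.head? = some ',' := by
  cases rest <;> simp [List.isPrefixOf] <;> aesop

lemma go_eq : ∀ (fuel : Nat) (l cur : List Char) (acc : List (List Char)),
    l.length ≤ fuel →
    PySem.Chars.splitOn.go [')', ','] fuel l cur acc =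
      acc.reverse ++ (gsplit l).modifyHead (cur.reverse ++ ·)
  | 0, l, cur, acc, h => by
    have : l = [] := List.eq_nil_of_length_eq_zero (Nat.le_zero.mp h)
    subst this
    rw [PySem.Chars.splitOn.go]
    simp [gsplit]
  | fuel + 1, [], cur, acc, _ => by
    rw [PySem.Chars.splitOn.go]
    simp [gsplit]
    omega
  | fuel + 1, c :: rest, cur, acc, h => by
    rw [PySem.Chars.splitOn.go]
    by_cases hp : List.isPrefixOf [')', ','] (c :: rest) = true
    · obtain ⟨hc, hd⟩ := (isPrefixOf_pair c rest).mp hp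
      rcases rest with _ | ⟨d, rest2⟩
      · simp at hd
      · obtain rfl : d = ',' := by simpa using hd
        subst hc
        rw [if_pos hp]
        have hlen : rest2.length ≤ fuel := by
          simp at h; omega
        rw [go_eq fuel _ [] _ (by simpa using hlen)]
        rcases hg : gsplit rest2 with _ | ⟨a, t⟩
        · exact absurd hg (gsplit_ne_nil rest2)
        · simp [gsplit, hg]
    · rw [if_neg hp]
      have hlen : rest.length ≤ fuel := by simp at h; omega
      rw [go_eq fuel rest (c :: cur) acc hlen]
      have hnp : ¬ (c = ')' ∧ rest.head? = some ',') := fun hx => hp ((isPrefixOf_pair c rest).mpr hx)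
      rcases rest with _ | ⟨d, rest2⟩
      · simp [gsplit]
      · have hnd : ¬ (c = ')' ∧ d = ',') := by simpa using hnp
        rcases hg : gsplit (d :: rest2) with _ | ⟨a, t⟩
        · exact absurd hg (gsplit_ne_nil (d :: rest2))
        · simp [gsplit, hg, hnd]

lemma splitOn_eq_gsplit (l : List Char) :
    PySem.Chars.splitOn l [')', ','] = gsplit l := by
  rw [PySem.Chars.splitOn]
  rw [go_eq (l.length + 1) l [] [] (by omega)]
  rcases hg : gsplit l with _ | ⟨a, t⟩
  · exact absurd hg (gsplit_ne_nil l)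
  · simp

-- atoms from the split pieces: ')' back on every non-final piece, empty final piece dropped
def assembleParts : List (List Char) → List (List Char)
  | [] => []
  | [p] => if p = [] then [] else [p]
  | p :: q :: rest => (p ++ [')']) :: assembleParts (q :: rest)

lemma assembleParts_cons (x : List Char) (parts : List (List Char)) (h : parts ≠ []) :
    assembleParts (x :: parts) = (x ++ [')']) :: assembleParts parts := by
  rcases parts with _ | ⟨q, rest⟩
  · exact absurd rfl h
  · rfl

lemma loopA_eq : ∀ (l : List Char) (result : List String) (atom : List Char) (prev : Option Char),
    pcFinish (l.foldl pcStep (result, atom, prev)) =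
      result ++ (if prev = some ')' ∧ l.head? = some ',' then
          String.mk atom :: (assembleParts (gsplit l.tail)).map String.mk
        else (assembleParts ((gsplit l).modifyHead (atom ++ ·))).map String.mk)
  | [], result, atom, prev => by
    simp only [List.foldl_nil, List.head?_nil, pcFinish, gsplit]
    by_cases ha : atom = [] <;> simp [ha, assembleParts]
  | c :: rest, result, atom, prev => by
    rw [List.foldl_cons]
    by_cases hs : c = ',' ∧ prev = some ')'
    · rw [show pcStep (result, atom, prev) c
            = (result ++ [String.mk atom], [], some c) by simp [pcStep, hs]]
      rw [loopA_eq rest (result ++ [String.mk atom]) [] (some c)]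
      obtain ⟨rfl, rfl⟩ := hs
      have : ¬ ((some ',' : Option Char) = some ')' ∧ rest.head? = some ',') := by simp
      rw [if_neg this]
      have hid : List.modifyHead (fun x : List Char => x) (gsplit rest) = gsplit rest := by
        cases gsplit rest <;> simp
      simp [hid]
  -- not a split step: the character joins the current atom
    · rw [show pcStep (result, atom, prev) c
            = (result, atom ++ [c], some c) by simp [pcStep, hs]]
      rw [loopA_eq rest result (atom ++ [c]) (some c)]
      have hout : ¬ (prev = some ')' ∧ (c :: rest).head? = some ',') := by
        simp only [List.head?_cons, Option.some.injEq]
        rintro ⟨h1, h2⟩; exact hs ⟨h2, h1⟩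
      rw [if_neg hout]
      by_cases hin : c = ')' ∧ rest.head? = some ','
      · obtain ⟨rfl, hd⟩ := hin
        rcases rest with _ | ⟨d, rest2⟩
        · simp at hd
        · obtain rfl : d = ',' := by simpa using hd
          rw [if_pos (by simp)]
          rcases hg : gsplit rest2 with _ | ⟨a, t⟩
          · exact absurd hg (gsplit_ne_nil rest2)
          · simp [gsplit, hg, assembleParts_cons _ _ (hg ▸ gsplit_ne_nil rest2)]
      · rw [if_neg (by simpa using hin)]
        rcases rest with _ | ⟨d, rest2⟩
        · simp [gsplit]
        · have hnd : ¬ (c = ')' ∧ d = ',') := by simpa using hin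
          rcases hg : gsplit (d :: rest2) with _ | ⟨a, t⟩
          · exact absurd hg (gsplit_ne_nil (d :: rest2))
          · simp [gsplit, hg, hnd]

lemma altB_bridge : ∀ parts : List (List Char), parts ≠ [] →
    (if parts.getLastD [] ≠ [] then
        parts.dropLast.map (fun p => String.mk (p ++ [')'])) ++ [String.mk (parts.getLastD [])]
      else parts.dropLast.map (fun p => String.mk (p ++ [')']))) =
      (assembleParts parts).map String.mk
  | [], h => absurd rfl h
  | [p], _ => by
    by_cases hp : p = [] <;> simp [hp, assembleParts]
  | p :: q :: rest, _ => by
    have ih := altB_bridge (q :: rest) (by simp)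
    have hlast : (p :: q :: rest).getLastD [] = (q :: rest).getLastD [] := by
      simp [List.getLastD_cons]
    rw [assembleParts_cons p (q :: rest) (by simp), List.map_cons,
        show (p :: q :: rest).dropLast = p :: (q :: rest).dropLast from rfl, List.map_cons, hlast]
    by_cases hc : (q :: rest).getLastD [] ≠ [] <;> simp only [hc, if_true, if_false, ite_not] <;>
      simp_all

lemma altB_eq (s : String) :
    parse_conjunction_py_alt s = (assembleParts (gsplit s.toList)).map String.mk := by
  unfold parse_conjunction_py_alt
  rw [splitOn_eq_gsplit]
  exact altB_bridge (gsplit s.toList) (gsplit_ne_nil s.toList)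

-- ===== VERDICT (by name: the statement is the Claim_ definition above) =====
theorem parse_conjunction_py_spec : Claim_equal_parse_conjunction_py := by
  intro s _
  unfold Spec_parse_conjunction_py parse_conjunction_py
  rw [altB_eq, loopA_eq s.toList [] [] none]
  rw [if_neg (by simp)]
  rcases hg : gsplit s.toList with _ | ⟨a, t⟩
  · exact absurd hg (gsplit_ne_nil s.toList)
  · simp
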